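-- pv_equiv track=rewrite | github.com/tiameister/Omni-ML-GUI | utils/plotting_helpers.py | _group_feature_indices
-- ===== SOURCE A (Python) =====
-- from typing import Dict, Tuple, List, Optional, Iterable
--
-- def _group_feature_indices(feat_names: List[str], num_cols: Iterable[str], cat_cols: Iterable[str]) -> Dict[str, List[int]]:
--     """
--     Build a mapping from raw feature names to list of indices in the processed
--     feature array. Numeric features map 1-to-1; categorical features map to all
--     their OneHot-encoded columns (prefix `raw_`).
--     """
--     groups: Dict[str, List[int]] = {c: [] for c in (list(num_cols) + list(cat_cols))}
--     # Index numeric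
--     name_to_idx = {n: i for i, n in enumerate(feat_names)}
--     for n in num_cols:
--         if n in name_to_idx:
--             groups[n].append(name_to_idx[n])
--     # Index categorical by prefix match
--     for c in cat_cols:
--         pref = f"{c}_"
--         for i, name in enumerate(feat_names):
--             if name.startswith(pref):
--                 groups[c].append(i)
--     # Drop empties
--     return {k: v for k, v in groups.items() if len(v) > 0}
-- ===== SOURCE B (Python) =====
-- from typing import Dict, List, Iterable
--
-- def _group_feature_indices(feat_names: List[str], num_cols: Iterable[str], cat_cols: Iterable[str]) -> Dict[str, List[int]]:
--     num_cols = list(num_cols)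
--     cat_cols = list(cat_cols)
--     # One pass over feat_names: every underscore position in a name yields a
--     # candidate raw prefix; index the name's position under each such prefix.
--     pref: Dict[str, List[int]] = {}
--     for i, name in enumerate(feat_names):
--         for j, ch in enumerate(name):
--             if ch == '_':
--                 pref.setdefault(name[:j], []).append(i)
--     name_to_idx = {n: i for i, n in enumerate(feat_names)}
--     groups: Dict[str, List[int]] = {c: [] for c in num_cols + cat_cols}
--     for n in num_cols:
--         idx = name_to_idx.get(n)
--         if idx is not None:
--             groups[n].append(idx)
--     for c in cat_cols:
--         groups[c].extend(pref.get(c, []))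
--     return {k: v for k, v in groups.items() if v}
-- ===== Notes on version B (the rewrite author's own statement) =====
-- stated objective: faster
-- what changed: Instead of scanning all feat_names with a startswith test once per categorical column, B makes a single pass over feat_names building a hash index from every underscore-prefix of each name to its indices, so each categorical column is answered by one dictionary lookup.
import Mathlib
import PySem

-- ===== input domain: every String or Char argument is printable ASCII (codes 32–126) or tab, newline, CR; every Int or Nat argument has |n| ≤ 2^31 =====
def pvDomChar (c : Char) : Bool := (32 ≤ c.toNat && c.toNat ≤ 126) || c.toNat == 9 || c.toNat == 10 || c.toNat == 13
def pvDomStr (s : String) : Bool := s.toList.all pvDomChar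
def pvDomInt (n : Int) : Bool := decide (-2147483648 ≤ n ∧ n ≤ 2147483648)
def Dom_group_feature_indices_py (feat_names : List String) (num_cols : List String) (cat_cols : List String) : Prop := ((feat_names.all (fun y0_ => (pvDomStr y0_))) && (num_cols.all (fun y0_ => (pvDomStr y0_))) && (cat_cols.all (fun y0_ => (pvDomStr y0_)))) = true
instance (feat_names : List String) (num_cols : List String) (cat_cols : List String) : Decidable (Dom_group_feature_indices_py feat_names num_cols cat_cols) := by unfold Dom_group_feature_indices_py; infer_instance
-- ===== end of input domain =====

-- B replaces A's per-categorical-column startswith-scan of feat_names by a single pass over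
-- feat_names that hash-indexes every underscore-prefix of each name; objective: faster (asymptotic).

-- ===== PORT A =====
def group_feature_indices_py (feat_names : List String) (num_cols : List String) (cat_cols : List String) : List (String × List Int) :=
  -- groups = {c: [] for c in (list(num_cols) + list(cat_cols))}
  let groups : PySem.Dict String (List Int) :=
    (num_cols ++ cat_cols).foldl (fun d c => d.insert c []) PySem.Dict.empty
  -- name_to_idx = {n: i for i, n in enumerate(feat_names)}
  let name_to_idx : PySem.Dict String Int :=
    (PySem.List.enumerate feat_names).foldl (fun d p => d.insert p.2 p.1) PySem.Dict.empty
  -- for n in num_cols: if n in name_to_idx: groups[n].append(name_to_idx[n])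
  let groups :=
    num_cols.foldl (fun d n =>
      if name_to_idx.contains n then d.modify n [] (· ++ [name_to_idx.getD n 0]) else d) groups
  -- for c in cat_cols: pref = c + "_"; for i, name in enumerate(feat_names): if name.startswith(pref): groups[c].append(i)
  let groups :=
    cat_cols.foldl (fun d c =>
      (PySem.List.enumerate feat_names).foldl (fun d p =>
        if PySem.Str.startswith p.2 (c ++ "_") then d.modify c [] (· ++ [p.1]) else d) d) groups
  -- return {k: v for k, v in groups.items() if len(v) > 0}
  groups.items.filter (fun kv => decide (0 < kv.2.length))

-- ===== PORT B =====
def group_feature_indices_py_alt (feat_names : List String) (num_cols : List String) (cat_cols : List String) : List (String × List Int) :=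
  -- pref: underscore-prefix of a name -> indices of the names having it (single pass over feat_names)
  let pref : PySem.Dict String (List Int) :=
    (PySem.List.enumerate feat_names).foldl (fun d p =>
      (PySem.List.enumerate p.2.toList).foldl (fun d q =>
        if q.2 == '_' then d.modify (String.ofList (p.2.toList.take q.1.toNat)) [] (· ++ [p.1]) else d) d)
      PySem.Dict.empty
  -- name_to_idx = {n: i for i, n in enumerate(feat_names)}
  let name_to_idx : PySem.Dict String Int :=
    (PySem.List.enumerate feat_names).foldl (fun d p => d.insert p.2 p.1) PySem.Dict.empty
  -- groups = {c: [] for c in num_cols + cat_cols}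
  let groups : PySem.Dict String (List Int) :=
    (num_cols ++ cat_cols).foldl (fun d c => d.insert c []) PySem.Dict.empty
  -- for n in num_cols: idx = name_to_idx.get(n); if idx is not None: groups[n].append(idx)
  let groups :=
    num_cols.foldl (fun d n =>
      match name_to_idx.get? n with
      | some idx => d.modify n [] (· ++ [idx])
      | none => d) groups
  -- for c in cat_cols: groups[c].extend(pref.get(c, []))
  let groups :=
    cat_cols.foldl (fun d c => d.modify c [] (· ++ pref.getD c [])) groups
  -- return {k: v for k, v in groups.items() if v}
  groups.items.filter (fun kv => decide (kv.2 ≠ []))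

-- ===== PRECONDITION & SPEC =====
def Spec_group_feature_indices_py (feat_names : List String) (num_cols : List String) (cat_cols : List String) (out : List (String × List Int)) : Prop := out = group_feature_indices_py_alt feat_names num_cols cat_cols
instance (feat_names : List String) (num_cols : List String) (cat_cols : List String) (out : List (String × List Int)) : Decidable (Spec_group_feature_indices_py feat_names num_cols cat_cols out) := by unfold Spec_group_feature_indices_py; infer_instance

-- ===== CLAIM (what is proved, stated in full; the proofs are below) =====
def Claim_equal_group_feature_indices_py : Prop := ∀ (feat_names : List String) (num_cols : List String) (cat_cols : List String), Dom_group_feature_indices_py feat_names num_cols cat_cols → Spec_group_feature_indices_py feat_names num_cols cat_cols (group_feature_indices_py feat_names num_cols cat_cols)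

-- ===== LEMMAS AND PROOFS =====

-- the common modify-append step
def pvStep (d : PySem.Dict String (List Int)) (p : String × Int) : PySem.Dict String (List Int) :=
  d.modify p.1 [] (· ++ [p.2])

-- the pairs A's numeric loop appends
def pvLnum (ni : PySem.Dict String Int) (num_cols : List String) : List (String × Int) :=
  (num_cols.filter (fun x => ni.contains x)).map (fun x => (x, ni.getD x 0))

-- the indices matching categorical column c by prefix scan (A's inner loop)
def pvM (feat_names : List String) (c : String) : List Int :=
  ((PySem.List.enumerate feat_names).filter (fun p => PySem.Str.startswith p.2 (c ++ "_"))).map (·.1)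

-- the pairs A's categorical double loop appends
def pvLcat (feat_names : List String) (cat_cols : List String) : List (String × Int) :=
  cat_cols.flatMap (fun c => (pvM feat_names c).map (fun i => (c, i)))

-- the per-name prefix pairs B's prefix pass appends
def pvF (p : Int × String) : List (String × Int) :=
  ((PySem.List.enumerate p.2.toList).filter (fun q => q.2 == '_')).map
    (fun q => (String.ofList (p.2.toList.take q.1.toNat), p.1))

def pvLpref (feat_names : List String) : List (String × Int) :=
  (PySem.List.enumerate feat_names).flatMap pvF

-- generic loop reshaping ---------------------------------------------------

theorem pv_loop1 (ni : PySem.Dict String Int) (l : List String) (d : PySem.Dict String (List Int)) :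
    l.foldl (fun d n =>
      if ni.contains n then d.modify n [] (· ++ [ni.getD n 0]) else d) d
    = (pvLnum ni l).foldl pvStep d := by
  induction l generalizing d with
  | nil => rfl
  | cons n l ih =>
    rw [List.foldl_cons, pvLnum, List.filter_cons]
    by_cases hc : ni.contains n = true
    · rw [if_pos hc, if_pos hc, List.map_cons, List.foldl_cons]
      exact ih _
    · rw [if_neg hc, if_neg hc]
      exact ih _

theorem pv_inner2 (feat_names : List String) (c : String) :
    ∀ (e : List (Int × String)) (d : PySem.Dict String (List Int)),
    e.foldl (fun d p =>
        if PySem.Str.startswith p.2 (c ++ "_") then d.modify c [] (· ++ [p.1]) else d) d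
    = (((e.filter (fun p => PySem.Str.startswith p.2 (c ++ "_"))).map (fun p => (c, p.1)))).foldl pvStep d := by
  intro e
  induction e with
  | nil => intro d; rfl
  | cons p e ih =>
    intro d
    rw [List.foldl_cons, List.filter_cons]
    by_cases hp : PySem.Str.startswith p.2 (c ++ "_") = true
    · rw [if_pos hp, if_pos hp, List.map_cons, List.foldl_cons]
      exact ih _
    · rw [if_neg hp, if_neg hp]
      exact ih _

theorem pv_loop2 (feat_names : List String) (cat_cols : List String) (d : PySem.Dict String (List Int)) :
    cat_cols.foldl (fun d c =>
      (PySem.List.enumerate feat_names).foldl (fun d p =>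
        if PySem.Str.startswith p.2 (c ++ "_") then d.modify c [] (· ++ [p.1]) else d) d) d
    = (pvLcat feat_names cat_cols).foldl pvStep d := by
  induction cat_cols generalizing d with
  | nil => rfl
  | cons c l ih =>
    rw [List.foldl_cons]
    have hsplit : pvLcat feat_names (c :: l)
        = (pvM feat_names c).map (fun i => (c, i)) ++ pvLcat feat_names l := by
      rw [pvLcat, List.flatMap_cons]; rfl
    have hmm : (pvM feat_names c).map (fun i => (c, i))
        = ((PySem.List.enumerate feat_names).filter
            (fun p => PySem.Str.startswith p.2 (c ++ "_"))).map (fun p => (c, p.1)) := by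
      simp [pvM, List.map_map, Function.comp_def]
    rw [hsplit, List.foldl_append, pv_inner2 feat_names c, hmm]
    exact ih _

theorem pv_inner_pref (cl : List Char) (i : Int) :
    ∀ (e : List (Int × Char)) (d : PySem.Dict String (List Int)),
    e.foldl (fun d q =>
        if q.2 == '_' then d.modify (String.ofList (cl.take q.1.toNat)) [] (· ++ [i]) else d) d
    = (((e.filter (fun q => q.2 == '_')).map (fun q => (String.ofList (cl.take q.1.toNat), i)))).foldl pvStep d := by
  intro e
  induction e with
  | nil => intro d; rfl
  | cons q e ih =>
    intro d
    rw [List.foldl_cons, List.filter_cons]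
    by_cases hq : (q.2 == '_') = true
    · rw [if_pos hq, if_pos hq, List.map_cons, List.foldl_cons]
      exact ih _
    · rw [if_neg hq, if_neg hq]
      exact ih _

theorem pv_prefbuild (feat_names : List String) :
    (PySem.List.enumerate feat_names).foldl (fun d p =>
      (PySem.List.enumerate p.2.toList).foldl (fun d q =>
        if q.2 == '_' then d.modify (String.ofList (p.2.toList.take q.1.toNat)) [] (· ++ [p.1]) else d) d)
      PySem.Dict.empty
    = (pvLpref feat_names).foldl pvStep PySem.Dict.empty := by
  have main : ∀ (E : List (Int × String)) (d : PySem.Dict String (List Int)),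
      E.foldl (fun d p =>
        (PySem.List.enumerate p.2.toList).foldl (fun d q =>
          if q.2 == '_' then d.modify (String.ofList (p.2.toList.take q.1.toNat)) [] (· ++ [p.1]) else d) d) d
      = (E.flatMap pvF).foldl pvStep d := by
    intro E
    induction E with
    | nil => intro d; rfl
    | cons p E ih =>
      intro d
      simp only [List.foldl_cons, List.flatMap_cons, List.foldl_append]
      rw [pv_inner_pref p.2.toList p.1]
      exact ih _
  exact main _ _

-- B's numeric loop is A's numeric loop (get? vs contains/getD), pointwise
theorem pv_numloopB (ni : PySem.Dict String Int) (l : List String) (d : PySem.Dict String (List Int)) :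
    l.foldl (fun d n =>
      match ni.get? n with
      | some idx => d.modify n [] (· ++ [idx])
      | none => d) d
    = l.foldl (fun d n =>
      if ni.contains n then d.modify n [] (· ++ [ni.getD n 0]) else d) d := by
  apply PySem.List.foldl_congr_mem
  intro d n _
  rw [PySem.Dict.contains_eq_isSome_get?]
  cases h : ni.get? n with
  | none => simp
  | some idx =>
    simp only [Option.isSome_some, if_true]
    rw [PySem.Dict.getD_eq_get?_getD, h]
    rfl

-- getD of B's extend loop
theorem pv_extend_fold (g : String → List Int) (l : List String) (d : PySem.Dict String (List Int)) (k : String) :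
    (l.foldl (fun d c => d.modify c [] (· ++ g c)) d).getD k []
    = d.getD k [] ++ (List.replicate (l.count k) (g k)).flatten := by
  induction l generalizing d with
  | nil => simp
  | cons c l ih =>
    rw [List.foldl_cons, ih, PySem.Dict.getD_modify]
    by_cases hk : k = c
    · subst hk
      simp [List.count_cons, List.replicate_succ, List.append_assoc]
    · have hck : (c == k) = false := by
        simp only [beq_eq_false_iff_ne, ne_eq]
        exact fun h => hk h.symm
      simp [hk, List.count_cons, hck]

-- values -------------------------------------------------------------------

theorem pv_getD_init (l : List String) (d : PySem.Dict String (List Int)) (k : String)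
    (h : d.getD k [] = []) :
    (l.foldl (fun d c => d.insert c []) d).getD k [] = [] := by
  induction l generalizing d with
  | nil => exact h
  | cons c l ih =>
    refine ih _ ?_
    rw [PySem.Dict.getD_insert]
    split <;> simp [h]

theorem pv_numpart (ni : PySem.Dict String Int) (num_cols : List String) (k : String) :
    ((pvLnum ni num_cols).filter (fun p => p.1 == k)).map (·.2)
    = if ni.contains k then List.replicate (num_cols.count k) (ni.getD k 0) else [] := by
  induction num_cols with
  | nil => by_cases hc : ni.contains k = true <;> simp [pvLnum, hc]
  | cons n l ih =>
    have step : pvLnum ni (n :: l)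
        = (if ni.contains n then [(n, ni.getD n 0)] else []) ++ pvLnum ni l := by
      rw [pvLnum, List.filter_cons]
      by_cases hc : ni.contains n = true
      · rw [if_pos hc, if_pos hc, List.map_cons]; rfl
      · rw [if_neg hc, if_neg hc]; rfl
    rw [step, List.filter_append, List.map_append, ih]
    by_cases hk : n = k
    · subst hk
      by_cases hc : ni.contains n = true
      · have hcnt : (n :: l).count n = l.count n + 1 := by simp [List.count_cons]
        simp [hc, hcnt, List.replicate_succ]
      · have hcnt : (n :: l).count n = l.count n + 1 := by simp [List.count_cons]
        simp [hc]
    · have hbk : (n == k) = false := by simp [hk]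
      have hcnt : (n :: l).count k = l.count k := by simp [List.count_cons, hk]
      by_cases hc : ni.contains n = true <;>
        simp [hc, hcnt, List.filter_cons, hbk]

theorem pv_catpart (feat_names : List String) (cat_cols : List String) (k : String) :
    ((pvLcat feat_names cat_cols).filter (fun p => p.1 == k)).map (·.2)
    = (List.replicate (cat_cols.count k) (pvM feat_names k)).flatten := by
  induction cat_cols with
  | nil => simp [pvLcat]
  | cons c l ih =>
    by_cases hk : c = k
    · subst hk
      simp_all [pvLcat, List.flatMap_cons, List.filter_append, List.map_append,
        List.count_cons, List.replicate_succ, List.filter_map, Function.comp_def]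
    · have hbk : (c == k) = false := by simp [hk]
      simp_all [pvLcat, List.flatMap_cons, List.filter_append, List.map_append,
        List.count_cons, List.filter_map, Function.comp_def, hbk]

-- the enumerate-filter singleton facts

theorem pv_fen {α : Type} (l : List α) (m : Nat) :
    (PySem.List.enumerate l).filter (fun q => q.1 == (m : Int))
    = if h : m < l.length then [((m : Int), l[m])] else [] := by
  induction l using List.reverseRecOn with
  | nil => simp [PySem.List.enumerate_nil]
  | append_singleton l a ih =>
    rw [PySem.List.enumerate_append]
    have h1 : PySem.List.enumerate [a] (0 + l.length) = [((l.length : Int), a)] := by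
      simp [PySem.List.enumerate_cons, PySem.List.enumerate_nil]
    rw [h1, List.filter_append, ih]
    by_cases hlt : m < l.length
    · have : m < l.length + 1 := by omega
      have hne : ((l.length : Int) == (m : Int)) = false := by
        simp; omega
      simp [hlt, this, hne, List.getElem_append, List.filter_cons]
    · by_cases heq : m = l.length
      · subst heq
        simp [hlt, List.getElem_append, List.filter_cons]
      · have h2 : ¬ m < l.length + 1 := by omega
        have hne : ((l.length : Int) == (m : Int)) = false := by
          simp; omega
        simp [hlt, h2, hne, List.filter_cons]

theorem pv_sing (l : List Char) (k : String) :
    (PySem.List.enumerate l).filter (fun q => q.2 == '_' && (String.ofList (l.take q.1.toNat) == k))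
    = if k.toList ++ ['_'] <+: l then [((k.toList.length : Int), '_')] else [] := by
  have hcong : ∀ q ∈ PySem.List.enumerate l,
      (q.2 == '_' && (String.ofList (l.take q.1.toNat) == k))
      = ((q.1 == (k.toList.length : Int)) && decide (k.toList ++ ['_'] <+: l)) := by
    intro q hq
    rw [PySem.List.mem_enumerate_iff] at hq
    obtain ⟨j, hj, hq⟩ := hq
    subst hq
    apply Bool.eq_iff_iff.mpr
    simp only [Bool.and_eq_true, beq_iff_eq, decide_eq_true_eq, zero_add, Int.toNat_natCast]
    constructor
    · rintro ⟨h1, h2⟩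
      have h2' : l.take j = k.toList := by
        have := congrArg String.toList h2
        simpa using this
      have hlen : (l.take j).length = j := by
        rw [List.length_take]; omega
      have hkl : k.toList.length = j := by rw [← h2', hlen]
      refine ⟨by rw [hkl], ?_⟩
      have htake : l.take (j + 1) = l.take j ++ [l[j]] := by
        rw [List.take_add_one, List.getElem?_eq_getElem hj]; rfl
      have hEq : k.toList ++ ['_'] = l.take (j + 1) := by
        rw [htake, h2', h1]
      rw [hEq]
      exact List.take_prefix _ _
    · rintro ⟨h1, h2⟩
      have hj2 : j = k.toList.length := by exact_mod_cast h1
      subst hj2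
      obtain ⟨t, ht⟩ := h2
      constructor
      · subst ht
        simp
      · have htake : l.take k.toList.length = k.toList := by
          rw [← ht, List.append_assoc]
          exact List.take_left' rfl
        rw [htake]
        simp
  rw [List.filter_congr hcong]
  by_cases hp : k.toList ++ ['_'] <+: l
  · rw [if_pos hp]
    obtain ⟨t, ht⟩ := hp
    have hcf : (fun q : Int × Char => (q.1 == (k.toList.length : Int)) && decide (k.toList ++ ['_'] <+: l))
        = fun q : Int × Char => q.1 == (k.toList.length : Int) := by
      funext q
      have hp' : k.toList ++ ['_'] <+: l := ⟨t, ht⟩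
      simp [hp']
    rw [hcf, pv_fen]
    have hm : k.toList.length < l.length := by
      rw [← ht]
      simp [List.length_append]
    rw [dif_pos hm]
    subst ht
    simp
  · rw [if_neg hp]
    have hcf : (fun q : Int × Char => (q.1 == (k.toList.length : Int)) && decide (k.toList ++ ['_'] <+: l))
        = fun _ : Int × Char => false := by
      funext q
      simp [hp]
    rw [hcf, List.filter_false]

theorem pv_per_name (s : String) (i : Int) (k : String) :
    ((((PySem.List.enumerate s.toList).filter (fun q => q.2 == '_')).map
        (fun q => (String.ofList (s.toList.take q.1.toNat), i))).filter (fun r => r.1 == k)).map (·.2)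
    = if PySem.Str.startswith s (k ++ "_") then [i] else [] := by
  rw [List.filter_map, List.filter_filter]
  have hcong : ∀ q ∈ PySem.List.enumerate s.toList,
      ((((fun r : String × Int => r.1 == k) ∘ (fun q : Int × Char => (String.ofList (s.toList.take q.1.toNat), i))) q) && (q.2 == '_'))
      = (q.2 == '_' && (String.ofList (s.toList.take q.1.toNat) == k)) := by
    intro q _
    simp [Function.comp_def, Bool.and_comm]
  rw [List.filter_congr hcong, pv_sing, List.map_map]
  have hsw : PySem.Str.startswith s (k ++ "_") = decide (k.toList ++ ['_'] <+: s.toList) := by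
    apply Bool.eq_iff_iff.mpr
    simp only [decide_eq_true_eq]
    rw [PySem.Str.startswith_eq, PySem.Chars.startswith_iff]
    have : (k ++ "_").toList = k.toList ++ ['_'] := by simp
    rw [this]
  rw [hsw]
  by_cases hp : k.toList ++ ['_'] <+: s.toList <;> simp [hp]

theorem pv_prefpart (feat_names : List String) (k : String) :
    ((pvLpref feat_names).filter (fun p => p.1 == k)).map (·.2) = pvM feat_names k := by
  have hsplit : ∀ (E : List (Int × String)),
      ((E.flatMap pvF).filter (fun p => p.1 == k)).map (·.2)
      = E.flatMap (fun p => ((pvF p).filter (fun r => r.1 == k)).map (·.2)) := by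
    intro E
    induction E with
    | nil => rfl
    | cons p E ih => simp [List.flatMap_cons, List.filter_append, List.map_append, ih]
  have hM : ∀ (E : List (Int × String)),
      ((E.filter (fun p => PySem.Str.startswith p.2 (k ++ "_"))).map (·.1))
      = E.flatMap (fun p => if PySem.Str.startswith p.2 (k ++ "_") then [p.1] else []) := by
    intro E
    induction E with
    | nil => rfl
    | cons p E ih =>
      rw [List.filter_cons, List.flatMap_cons]
      by_cases hp : PySem.Str.startswith p.2 (k ++ "_") = true
      · rw [if_pos hp, if_pos hp, List.map_cons, ih]
        rfl
      · rw [if_neg hp, if_neg hp, ih, List.nil_append]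
  rw [pvLpref, hsplit, pvM, hM]
  congr 1
  funext p
  rw [pvF, pv_per_name]

-- keys ----------------------------------------------------------------------

theorem pv_update_subset (s : PySem.Set String) (xs : List String) (h : ∀ x ∈ xs, x ∈ s) :
    PySem.Set.update s xs = s := by
  induction xs generalizing s with
  | nil => rfl
  | cons x xs ih =>
    have hx : x ∈ s := h x (by simp)
    have : PySem.Set.add s x = s := by simp [PySem.Set.add, hx]
    simp only [PySem.Set.update, List.foldl_cons] at *
    rw [this]
    exact ih s (fun y hy => h y (by simp [hy]))

-- dict-fold facts specialised to pvStep

theorem pv_getD_fold (L : List (String × Int)) (d : PySem.Dict String (List Int)) (k : String) :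
    (L.foldl pvStep d).getD k [] = d.getD k [] ++ (L.filter (fun p => p.1 == k)).map (·.2) :=
  PySem.Dict.getD_foldl_modify_append _ _ _

theorem pv_keys_fold (L : List (String × Int)) (d : PySem.Dict String (List Int)) :
    (L.foldl pvStep d).keys = PySem.Set.update d.keys (L.map (·.1)) :=
  PySem.Dict.keys_foldl_modify_key _ _ _ _ _

-- ===== VERDICT (by name: the statement is the Claim_ definition above) =====
theorem group_feature_indices_py_spec : Claim_equal_group_feature_indices_py := by
  intro f n c _
  show group_feature_indices_py f n c = group_feature_indices_py_alt f n c
  simp only [group_feature_indices_py, group_feature_indices_py_alt]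
  rw [pv_loop1, pv_loop2, ← List.foldl_append, pv_numloopB, pv_loop1, pv_prefbuild]
  set NI := (PySem.List.enumerate f).foldl (fun d p => d.insert p.2 p.1) PySem.Dict.empty with hNI
  set PD := (pvLpref f).foldl pvStep PySem.Dict.empty with hPD
  set G0 := (n ++ c).foldl (fun d x => d.insert x ([] : List Int)) PySem.Dict.empty with hG0
  set gA := (pvLnum NI n ++ pvLcat f c).foldl pvStep G0 with hgA
  set gB := c.foldl (fun d k => d.modify k [] (· ++ PD.getD k [])) ((pvLnum NI n).foldl pvStep G0) with hgB
  -- per-key value agreement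
  have hpd : ∀ k : String, PD.getD k [] = pvM f k := by
    intro k
    rw [hPD, pv_getD_fold, PySem.Dict.getD_empty, List.nil_append, pv_prefpart]
  have hg0 : ∀ k : String, G0.getD k [] = [] := fun k =>
    pv_getD_init (n ++ c) PySem.Dict.empty k (PySem.Dict.getD_empty _ _)
  have hval : ∀ k : String, gA.getD k [] = gB.getD k [] := by
    intro k
    rw [hgA, hgB, pv_getD_fold, pv_extend_fold, pv_getD_fold,
      List.filter_append, List.map_append, pv_numpart, pv_catpart, hpd, hg0, List.append_assoc]
  -- keys agreement
  have hkeys0 : G0.keys = PySem.Set.ofList (n ++ c) := by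
    rw [hG0, PySem.Dict.keys_foldl_insert]
    rfl
  have hsubn : ∀ x ∈ (pvLnum NI n).map (fun p => p.1), x ∈ PySem.Set.ofList (n ++ c) := by
    intro x hx
    rw [PySem.Set.mem_ofList]
    rcases List.mem_map.mp hx with ⟨p, hp, hpx⟩
    rcases List.mem_map.mp hp with ⟨a, ha, hap⟩
    have hax : a = x := by rw [← hpx, ← hap]
    exact List.mem_append_left _ (hax ▸ (List.mem_filter.mp ha).1)
  have hsubc : ∀ x ∈ (pvLcat f c).map (fun p => p.1), x ∈ PySem.Set.ofList (n ++ c) := by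
    intro x hx
    rw [PySem.Set.mem_ofList]
    rcases List.mem_map.mp hx with ⟨p, hp, hpx⟩
    rcases List.mem_flatMap.mp hp with ⟨cc, hcc2, hmem⟩
    rcases List.mem_map.mp hmem with ⟨i, _, hip⟩
    have hcx : cc = x := by rw [← hpx, ← hip]
    exact List.mem_append_right _ (hcx ▸ hcc2)
  have hsubc' : ∀ x ∈ c, x ∈ PySem.Set.ofList (n ++ c) := by
    intro x hx
    rw [PySem.Set.mem_ofList]
    exact List.mem_append_right _ hx
  have hsub : ∀ x ∈ (pvLnum NI n ++ pvLcat f c).map (fun p => p.1), x ∈ PySem.Set.ofList (n ++ c) := by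
    intro x hx
    rw [List.map_append, List.mem_append] at hx
    rcases hx with h | h
    · exact hsubn x h
    · exact hsubc x h
  have hkA : gA.keys = PySem.Set.ofList (n ++ c) := by
    rw [hgA, pv_keys_fold, hkeys0, pv_update_subset _ _ hsub]
  have hkB : gB.keys = PySem.Set.ofList (n ++ c) := by
    have h1 : ((pvLnum NI n).foldl pvStep G0).keys = PySem.Set.ofList (n ++ c) := by
      rw [pv_keys_fold, hkeys0, pv_update_subset _ _ hsubn]
    rw [hgB, PySem.Dict.keys_foldl_modify, h1, pv_update_subset _ _ hsubc']
  have hnd : gA.keys.Nodup := by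
    rw [hkA]
    exact PySem.Set.nodup_ofList _
  have hndB : gB.keys.Nodup := by
    rw [hkB]
    exact PySem.Set.nodup_ofList _
  rw [PySem.Dict.items_eq_map_keys gA hnd [], PySem.Dict.items_eq_map_keys gB hndB [], hkA, hkB]
  have hfun : (fun k => (k, gA.getD k [])) = (fun k => (k, gB.getD k [])) := by
    funext k
    rw [hval k]
  have hpred : (fun kv : String × List Int => decide (0 < kv.2.length))
      = (fun kv : String × List Int => decide (kv.2 ≠ [])) := by
    funext kv
    rw [decide_eq_decide]
    exact List.length_pos_iff
  rw [hfun, hpred]
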